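-- pv_equiv track=rewrite | github.com/FZ1977/Python | DifferenzaSimmetrica.py | differenza_simmetrica
-- ===== SOURCE A (Python) =====
-- def differenza_simmetrica(a, b):
--     c = {}
--     for k, v in a.items():
--         if k not in b:
--             c[k] = v
--
--     for k, v in b.items():
--         if k not in a:
--             c[k] = v
--
--     return c
-- ===== SOURCE B (Python) =====
-- def differenza_simmetrica(a, b):
--     # Count key occurrences across both dicts; a key is in the symmetric
--     # difference exactly when its total count is 1 (no membership tests).
--     cnt = {}
--     for k in a:
--         cnt[k] = cnt.get(k, 0) + 1
--     for k in b:
--         cnt[k] = cnt.get(k, 0) + 1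
--     return {k: v for d in (a, b) for k, v in d.items() if cnt[k] == 1}
-- ===== Notes on version B (the rewrite author's own statement) =====
-- stated objective: alternative
-- what changed: Replaces A's two membership-filtering loops (k not in b / k not in a) by an occurrence counter over the keys of both dicts built once, then one comprehension keeping exactly the items whose key count is 1; no membership test against the other dict remains.
import Mathlib
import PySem

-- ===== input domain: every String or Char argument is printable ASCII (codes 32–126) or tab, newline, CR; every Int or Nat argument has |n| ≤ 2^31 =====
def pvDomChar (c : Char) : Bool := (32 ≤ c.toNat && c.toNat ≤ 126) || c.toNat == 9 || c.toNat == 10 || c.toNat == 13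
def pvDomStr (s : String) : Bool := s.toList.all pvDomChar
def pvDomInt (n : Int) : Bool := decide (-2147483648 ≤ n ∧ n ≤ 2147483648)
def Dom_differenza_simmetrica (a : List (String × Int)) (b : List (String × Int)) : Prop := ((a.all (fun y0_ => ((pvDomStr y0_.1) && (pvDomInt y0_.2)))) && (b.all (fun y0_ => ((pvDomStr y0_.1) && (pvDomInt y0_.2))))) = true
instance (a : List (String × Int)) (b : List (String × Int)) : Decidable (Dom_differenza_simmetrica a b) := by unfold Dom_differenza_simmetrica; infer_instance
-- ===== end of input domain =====

-- B replaces A's two membership-filtering loops by an occurrence counter over the keys of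
-- both dicts built once, then one pass keeping exactly the items whose key count is 1
-- (alternative decomposition, same cost; no membership test against the other dict remains).

-- ===== PORT A =====
def differenza_simmetrica (a : List (String × Int)) (b : List (String × Int)) : List (String × Int) :=
  -- c = {} ; first loop over a.items(), then loop over b.items(); return c
  let c : PySem.Dict String Int :=
    a.foldl (fun c kv =>
      if (b.map Prod.fst).contains kv.1 then c else c.insert kv.1 kv.2) PySem.Dict.empty
  let c :=
    b.foldl (fun c kv =>
      if (a.map Prod.fst).contains kv.1 then c else c.insert kv.1 kv.2) c
  c.items

-- ===== PORT B =====
-- the two dict arguments as PySem.Dicts (dict() semantics over the assoc lists)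
def pvDictOf (l : List (String × Int)) : PySem.Dict String Int :=
  l.foldl (fun d kv => d.insert kv.1 kv.2) PySem.Dict.empty

def differenza_simmetrica_alt (a : List (String × Int)) (b : List (String × Int)) : List (String × Int) :=
  let da := pvDictOf a
  let db := pvDictOf b
  -- cnt = {}; for k in a: cnt[k] = cnt.get(k, 0) + 1; for k in b: …
  let cnt : PySem.Dict String Int :=
    da.keys.foldl (fun c k => c.insert k (c.getD k 0 + 1)) PySem.Dict.empty
  let cnt := db.keys.foldl (fun c k => c.insert k (c.getD k 0 + 1)) cnt
  -- {k: v for d in (a, b) for k, v in d.items() if cnt[k] == 1}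
  (((da.items ++ db.items).filter (fun kv => cnt.getD kv.1 0 == 1)).foldl
      (fun d kv => d.insert kv.1 kv.2) PySem.Dict.empty).items

-- ===== PRECONDITION & SPEC =====
def Spec_differenza_simmetrica (a : List (String × Int)) (b : List (String × Int)) (out : List (String × Int)) : Prop := out = differenza_simmetrica_alt a b
instance (a : List (String × Int)) (b : List (String × Int)) (out : List (String × Int)) : Decidable (Spec_differenza_simmetrica a b out) := by unfold Spec_differenza_simmetrica; infer_instance

-- ===== CLAIM (what is proved, stated in full; the proofs are below) =====
def Claim_equal_differenza_simmetrica : Prop := ∀ (a : List (String × Int)) (b : List (String × Int)), Dom_differenza_simmetrica a b → Spec_differenza_simmetrica a b (differenza_simmetrica a b)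

-- ===== LEMMAS AND PROOFS =====

-- A conditional-insert loop is the plain insert loop over the filtered list.
theorem foldl_cond_insert (l : List (String × Int)) (p : String → Bool)
    (d : PySem.Dict String Int) :
    l.foldl (fun c kv => if p kv.1 then c else c.insert kv.1 kv.2) d
      = (l.filter (fun kv => !p kv.1)).foldl (fun c kv => c.insert kv.1 kv.2) d := by
  induction l generalizing d with
  | nil => rfl
  | cons kv t ih =>
    by_cases h : p kv.1 = true
    · simp [h, ih]
    · simp only [Bool.not_eq_true] at h
      simp [h, ih]

-- contains on a key-filtered item list is unchanged when the key passes the filter.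
theorem contains_filter (l : List (String × Int)) (q : String → Bool) (k : String)
    (hq : q k = true) :
    ((l.filter (fun p => q p.1)).any (fun p => p.1 == k)) = l.any (fun p => p.1 == k) := by
  induction l with
  | nil => rfl
  | cons x t ih =>
    by_cases hx : x.1 = k
    · subst hx
      simp [hq, List.any_cons, ih]
    · by_cases hqx : q x.1 = true <;>
        simp [hqx, List.any_cons, ih, hx]

-- Replacing all key-k entries commutes with a key filter that keeps k.
theorem filter_map_replace_pos (q : String → Bool) (k : String) (v : Int)
    (hq : q k = true) (l : List (String × Int)) :
    List.filter (fun p => q p.1) (l.map (fun p => if (p.1 == k) = true then (k, v) else p))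
      = (List.filter (fun p => q p.1) l).map (fun p => if (p.1 == k) = true then (k, v) else p) := by
  simp only [beq_iff_eq]
  induction l with
  | nil => rfl
  | cons x t ih =>
    by_cases hx : x.1 = k
    · simp [hx, hq, ih]
    · by_cases hqx : q x.1 = true <;> simp [hx, hqx, ih]

-- Replacing all key-k entries vanishes under a key filter that drops k.
theorem filter_map_replace_neg (q : String → Bool) (k : String) (v : Int)
    (hq : q k = false) (l : List (String × Int)) :
    List.filter (fun p => q p.1) (l.map (fun p => if (p.1 == k) = true then (k, v) else p))
      = List.filter (fun p => q p.1) l := by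
  simp only [beq_iff_eq]
  induction l with
  | nil => rfl
  | cons x t ih =>
    by_cases hx : x.1 = k
    · simp [hx, hq, ih]
    · by_cases hqx : q x.1 = true <;> simp [hx, hqx, ih]

-- Filtering the items by a key predicate commutes with the insert loop.
theorem filter_items_foldl_insert (q : String → Bool) (l : List (String × Int)) :
    ∀ d : PySem.Dict String Int,
    ((l.foldl (fun c kv => c.insert kv.1 kv.2) d).items.filter (fun p => q p.1))
      = ((l.filter (fun kv => q kv.1)).foldl (fun c kv => c.insert kv.1 kv.2)
          (PySem.Dict.mk (d.items.filter (fun p => q p.1)))).items := by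
  induction l with
  | nil => intro d; simp
  | cons kv t ih =>
    intro d
    have step :
        ((d.insert kv.1 kv.2).items.filter (fun p => q p.1))
          = if q kv.1 then
              (((PySem.Dict.mk (d.items.filter (fun p => q p.1))).insert kv.1 kv.2).items)
            else d.items.filter (fun p => q p.1) := by
      have hc : (PySem.Dict.mk (d.items.filter (fun p => q p.1))).contains kv.1
            = d.contains kv.1 ∨ q kv.1 = false := by
        by_cases hq : q kv.1 = true
        · left
          rcases d with ⟨itms⟩
          rw [PySem.Dict.contains_mk, PySem.Dict.contains_mk]
          exact contains_filter itms q kv.1 hq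
        · right; simpa using hq
      by_cases hq : q kv.1 = true
      · rw [if_pos hq, PySem.Dict.items_insert, PySem.Dict.items_insert]
        rcases hc with hc | hc
        · rw [hc]
          by_cases hcon : d.contains kv.1 = true
          · rw [if_pos hcon, if_pos hcon]
            exact filter_map_replace_pos q kv.1 kv.2 hq d.items
          · rw [if_neg hcon, if_neg hcon, List.filter_append]
            simp [hq]
        · rw [hq] at hc; exact absurd hc (by simp)
      · simp only [Bool.not_eq_true] at hq
        rw [if_neg (by simp [hq]), PySem.Dict.items_insert]
        by_cases hcon : d.contains kv.1 = true
        · rw [if_pos hcon]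
          exact filter_map_replace_neg q kv.1 kv.2 hq d.items
        · rw [if_neg hcon, List.filter_append]
          simp [hq]
    by_cases hq : q kv.1 = true
    · have hf : List.filter (fun kv => q kv.1) (kv :: t)
          = kv :: List.filter (fun kv => q kv.1) t := by simp [hq]
      rw [List.foldl_cons, ih (d.insert kv.1 kv.2), step, if_pos hq, hf, List.foldl_cons]
    · have hq' : q kv.1 = false := by simpa using hq
      have hf : List.filter (fun kv => q kv.1) (kv :: t)
          = List.filter (fun kv => q kv.1) t := by simp [hq']
      rw [List.foldl_cons, ih (d.insert kv.1 kv.2), step, if_neg (by simp [hq']), hf]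

-- Replacing key-k entries is the identity on a list without key k.
theorem map_replace_id (k : String) (v : Int) (M : List (String × Int))
    (h : M.any (fun p => p.1 == k) = false) :
    M.map (fun p => if (p.1 == k) = true then (k, v) else p) = M := by
  induction M with
  | nil => rfl
  | cons x t ih =>
    simp only [List.any_cons, Bool.or_eq_false_iff] at h
    have hx : ¬ ((x.1 == k) = true) := by simp [h.1]
    simp only [List.map_cons, if_neg hx, ih h.2]

-- Inserting keys disjoint from a prefix M leaves M untouched in front.
theorem foldl_insert_disjoint_prefix (L : List (String × Int)) :
    ∀ (M : List (String × Int)) (e : PySem.Dict String Int),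
    (∀ k ∈ L.map Prod.fst, M.any (fun p => p.1 == k) = false) →
    (L.foldl (fun d kv => d.insert kv.1 kv.2) (PySem.Dict.mk (M ++ e.items)))
      = PySem.Dict.mk (M ++ (L.foldl (fun d kv => d.insert kv.1 kv.2) e).items) := by
  induction L with
  | nil => intro M e _; rcases e with ⟨itms⟩; rfl
  | cons kv t ih =>
    intro M e h
    have hM : M.any (fun p => p.1 == kv.1) = false :=
      h kv.1 (by simp)
    have hcon : (PySem.Dict.mk (M ++ e.items)).contains kv.1 = e.contains kv.1 := by
      rcases e with ⟨itms⟩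
      rw [PySem.Dict.contains_mk, PySem.Dict.contains_mk, List.any_append, hM]
      simp
    have step : (PySem.Dict.mk (M ++ e.items)).insert kv.1 kv.2
        = PySem.Dict.mk (M ++ (e.insert kv.1 kv.2).items) := by
      apply PySem.Dict.ext
      rw [PySem.Dict.items_insert, PySem.Dict.items_insert, hcon]
      by_cases hc : e.contains kv.1 = true
      · rw [if_pos hc, if_pos hc]
        show (M ++ e.items).map _ = _
        rw [List.map_append, map_replace_id kv.1 kv.2 M hM]
      · rw [if_neg hc, if_neg hc]
        show (M ++ e.items) ++ [kv] = M ++ (e.items ++ [kv])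
        rw [List.append_assoc]
    rw [List.foldl_cons, step, ih M (e.insert kv.1 kv.2)
      (fun k hk => h k (by simp [hk])), List.foldl_cons]

-- keys of the dict built from an assoc list, and their nodup-ness.
theorem keys_pvDictOf (l : List (String × Int)) :
    (pvDictOf l).keys = PySem.Set.ofList (l.map Prod.fst) := by
  unfold pvDictOf
  rw [PySem.Dict.keys_foldl_insert_key (key := Prod.fst) (f := fun _ kv => kv.2),
    PySem.Dict.keys_empty, PySem.Set.update_nil_left]

theorem nodup_keys_pvDictOf (l : List (String × Int)) :
    (pvDictOf l).keys.Nodup := by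
  rw [keys_pvDictOf]
  exact PySem.Set.nodup_ofList _

-- counter value = total occurrence count of the key in both key lists
theorem cnt_getD (K1 K2 : List String) (k : String) :
    ((K2.foldl (fun c k => c.insert k (c.getD k 0 + 1))
        (K1.foldl (fun c k => c.insert k (c.getD k 0 + 1)) PySem.Dict.empty)).getD k 0)
      = (K1.count k : Int) + (K2.count k : Int) := by
  rw [PySem.Dict.getD_foldl_insert_add_one, PySem.Dict.getD_foldl_insert_add_one,
    PySem.Dict.getD_empty]
  omega

-- an insert loop from empty over a list with pairwise-distinct keys rebuilds exactly that list
theorem foldl_insert_nodup (L : List (String × Int)) (h : (L.map Prod.fst).Nodup) :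
    (L.foldl (fun d kv => d.insert kv.1 kv.2) PySem.Dict.empty).items = L := by
  induction L with
  | nil => rfl
  | cons kv t ih =>
    rw [List.map_cons, List.nodup_cons] at h
    have h0 : (PySem.Dict.empty : PySem.Dict String Int).insert kv.1 kv.2
        = PySem.Dict.mk ([kv] ++ (PySem.Dict.empty : PySem.Dict String Int).items) := by
      apply PySem.Dict.ext
      rw [PySem.Dict.items_insert]
      simp [PySem.Dict.empty]
    have hdis : ∀ k ∈ t.map Prod.fst,
        ([kv] : List (String × Int)).any (fun p => p.1 == k) = false := by
      intro k hk
      simp only [List.any_cons, List.any_nil, Bool.or_false, beq_eq_false_iff_ne]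
      intro he
      exact h.1 (he ▸ hk)
    rw [List.foldl_cons, h0, foldl_insert_disjoint_prefix t [kv] PySem.Dict.empty hdis]
    simp [ih h.2]

-- key membership facts for the two filtered item lists
theorem mem_keys_filter_not_b (a b : List (String × Int)) (k : String)
    (hk : k ∈ ((pvDictOf a).items.filter (fun p => !((b.map Prod.fst).contains p.1))).map Prod.fst) :
    k ∈ (pvDictOf a).keys ∧ k ∉ b.map Prod.fst := by
  rcases List.mem_map.mp hk with ⟨p, hp, rfl⟩
  rcases List.mem_filter.mp hp with ⟨hmem, hflt⟩
  constructor
  · exact List.mem_map.mpr ⟨p, hmem, rfl⟩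
  · simpa using hflt

-- ===== VERDICT (by name: the statement is the Claim_ definition above) =====
theorem differenza_simmetrica_spec : Claim_equal_differenza_simmetrica := by
  intro a b _
  show differenza_simmetrica a b = differenza_simmetrica_alt a b
  -- X, Y: the two halves of the symmetric difference, as filtered dict item lists
  have hX : (pvDictOf a).items.filter (fun p => !((b.map Prod.fst).contains p.1))
      = ((a.filter (fun kv => !((b.map Prod.fst).contains kv.1))).foldl
          (fun c kv => c.insert kv.1 kv.2) PySem.Dict.empty).items :=
    filter_items_foldl_insert (fun k => !((b.map Prod.fst).contains k)) a PySem.Dict.empty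
  have hY : (pvDictOf b).items.filter (fun p => !((a.map Prod.fst).contains p.1))
      = ((b.filter (fun kv => !((a.map Prod.fst).contains kv.1))).foldl
          (fun c kv => c.insert kv.1 kv.2) PySem.Dict.empty).items :=
    filter_items_foldl_insert (fun k => !((a.map Prod.fst).contains k)) b PySem.Dict.empty
  -- ===== A's side reduces to X ++ Y =====
  have hA : differenza_simmetrica a b
      = ((b.filter (fun kv => !((a.map Prod.fst).contains kv.1))).foldl
          (fun c kv => c.insert kv.1 kv.2)
          ((a.filter (fun kv => !((b.map Prod.fst).contains kv.1))).foldl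
            (fun c kv => c.insert kv.1 kv.2) PySem.Dict.empty)).items := by
    simp only [differenza_simmetrica]
    rw [foldl_cond_insert, foldl_cond_insert]
  have hdisj : ∀ k ∈ (b.filter (fun kv => !((a.map Prod.fst).contains kv.1))).map Prod.fst,
      (((pvDictOf a).items.filter (fun p => !((b.map Prod.fst).contains p.1))).any
        (fun p => p.1 == k)) = false := by
    intro k hk
    have hkb : k ∈ b.map Prod.fst := by
      rcases List.mem_map.mp hk with ⟨kv, hkv, rfl⟩
      exact List.mem_map.mpr ⟨kv, (List.mem_filter.mp hkv).1, rfl⟩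
    rw [List.any_eq_false]
    intro p hp
    have h2 := (mem_keys_filter_not_b a b p.1 (List.mem_map.mpr ⟨p, hp, rfl⟩)).2
    simp only [beq_iff_eq]
    intro he
    exact h2 (he ▸ hkb)
  have hAsplit : differenza_simmetrica a b
      = ((pvDictOf a).items.filter (fun p => !((b.map Prod.fst).contains p.1)))
        ++ ((pvDictOf b).items.filter (fun p => !((a.map Prod.fst).contains p.1))) := by
    rw [hA]
    have hbase : ((a.filter (fun kv => !((b.map Prod.fst).contains kv.1))).foldl
          (fun c kv => c.insert kv.1 kv.2) PySem.Dict.empty)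
        = PySem.Dict.mk
            (((pvDictOf a).items.filter (fun p => !((b.map Prod.fst).contains p.1)))
              ++ (PySem.Dict.empty : PySem.Dict String Int).items) := by
      apply PySem.Dict.ext
      rw [hX]
      simp [PySem.Dict.empty]
    rw [hbase, foldl_insert_disjoint_prefix _ _ _ (by rw [hX] at hdisj ⊢; exact hdisj)]
    show _ ++ _ = _ ++ _
    rw [hY]
  -- ===== B's side reduces to the same list =====
  have hcnt : ∀ k : String,
      (((pvDictOf b).keys.foldl (fun c k => c.insert k (c.getD k 0 + 1))
          ((pvDictOf a).keys.foldl (fun c k => c.insert k (c.getD k 0 + 1))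
            (PySem.Dict.empty : PySem.Dict String Int))).getD k 0)
        = ((pvDictOf a).keys.count k : Int) + ((pvDictOf b).keys.count k : Int) :=
    fun k => cnt_getD (pvDictOf a).keys (pvDictOf b).keys k
  have hmemkeys : ∀ (l : List (String × Int)) (k : String),
      k ∈ (pvDictOf l).keys ↔ k ∈ l.map Prod.fst := by
    intro l k
    rw [keys_pvDictOf]
    exact PySem.Set.mem_ofList _ _
  have hfiltA : ∀ kv ∈ (pvDictOf a).items,
      ((((pvDictOf b).keys.foldl (fun c k => c.insert k (c.getD k 0 + 1))
          ((pvDictOf a).keys.foldl (fun c k => c.insert k (c.getD k 0 + 1))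
            (PySem.Dict.empty : PySem.Dict String Int))).getD kv.1 0) == 1)
        = !((b.map Prod.fst).contains kv.1) := by
    intro kv hkv
    have hka : kv.1 ∈ (pvDictOf a).keys := List.mem_map.mpr ⟨kv, hkv, rfl⟩
    have hc1 : (pvDictOf a).keys.count kv.1 = 1 :=
      List.count_eq_one_of_mem (nodup_keys_pvDictOf a) hka
    by_cases hkb : kv.1 ∈ b.map Prod.fst
    · have hkb' : kv.1 ∈ (pvDictOf b).keys := (hmemkeys b kv.1).mpr hkb
      have hpos : 0 < (pvDictOf b).keys.count kv.1 := List.count_pos_iff.mpr hkb'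
      have hne : (((pvDictOf b).keys.foldl (fun c k => c.insert k (c.getD k 0 + 1))
          ((pvDictOf a).keys.foldl (fun c k => c.insert k (c.getD k 0 + 1))
            (PySem.Dict.empty : PySem.Dict String Int))).getD kv.1 0) ≠ 1 := by
        rw [hcnt kv.1, hc1]
        omega
      rw [beq_eq_false_iff_ne.mpr hne]
      simp [hkb]
    · have hz : (pvDictOf b).keys.count kv.1 = 0 :=
        List.count_eq_zero.mpr (fun h => hkb ((hmemkeys b kv.1).mp h))
      have he1 : (((pvDictOf b).keys.foldl (fun c k => c.insert k (c.getD k 0 + 1))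
          ((pvDictOf a).keys.foldl (fun c k => c.insert k (c.getD k 0 + 1))
            (PySem.Dict.empty : PySem.Dict String Int))).getD kv.1 0) = 1 := by
        rw [hcnt kv.1, hc1, hz]
        omega
      rw [he1]
      simp [hkb]
  have hfiltB : ∀ kv ∈ (pvDictOf b).items,
      ((((pvDictOf b).keys.foldl (fun c k => c.insert k (c.getD k 0 + 1))
          ((pvDictOf a).keys.foldl (fun c k => c.insert k (c.getD k 0 + 1))
            (PySem.Dict.empty : PySem.Dict String Int))).getD kv.1 0) == 1)
        = !((a.map Prod.fst).contains kv.1) := by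
    intro kv hkv
    have hkb : kv.1 ∈ (pvDictOf b).keys := List.mem_map.mpr ⟨kv, hkv, rfl⟩
    have hc1 : (pvDictOf b).keys.count kv.1 = 1 :=
      List.count_eq_one_of_mem (nodup_keys_pvDictOf b) hkb
    by_cases hka : kv.1 ∈ a.map Prod.fst
    · have hka' : kv.1 ∈ (pvDictOf a).keys := (hmemkeys a kv.1).mpr hka
      have hpos : 0 < (pvDictOf a).keys.count kv.1 := List.count_pos_iff.mpr hka'
      have hne : (((pvDictOf b).keys.foldl (fun c k => c.insert k (c.getD k 0 + 1))
          ((pvDictOf a).keys.foldl (fun c k => c.insert k (c.getD k 0 + 1))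
            (PySem.Dict.empty : PySem.Dict String Int))).getD kv.1 0) ≠ 1 := by
        rw [hcnt kv.1, hc1]
        omega
      rw [beq_eq_false_iff_ne.mpr hne]
      simp [hka]
    · have hz : (pvDictOf a).keys.count kv.1 = 0 :=
        List.count_eq_zero.mpr (fun h => hka ((hmemkeys a kv.1).mp h))
      have he1 : (((pvDictOf b).keys.foldl (fun c k => c.insert k (c.getD k 0 + 1))
          ((pvDictOf a).keys.foldl (fun c k => c.insert k (c.getD k 0 + 1))
            (PySem.Dict.empty : PySem.Dict String Int))).getD kv.1 0) = 1 := by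
        rw [hcnt kv.1, hc1, hz]
        omega
      rw [he1]
      simp [hka]
  -- the one filter in B splits into the two halves
  have hBfilter :
      (((pvDictOf a).items ++ (pvDictOf b).items).filter (fun kv =>
          (((pvDictOf b).keys.foldl (fun c k => c.insert k (c.getD k 0 + 1))
            ((pvDictOf a).keys.foldl (fun c k => c.insert k (c.getD k 0 + 1))
              (PySem.Dict.empty : PySem.Dict String Int))).getD kv.1 0) == 1))
        = ((pvDictOf a).items.filter (fun p => !((b.map Prod.fst).contains p.1)))
          ++ ((pvDictOf b).items.filter (fun p => !((a.map Prod.fst).contains p.1))) := by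
    rw [List.filter_append]
    congr 1
    · exact List.filter_congr hfiltA
    · exact List.filter_congr hfiltB
  -- the final rebuild keeps the list as is (all keys distinct)
  have hnodX : ((((pvDictOf a).items.filter
        (fun p => !((b.map Prod.fst).contains p.1))).map Prod.fst)).Nodup := by
    have hs : ((((pvDictOf a).items.filter
          (fun p => !((b.map Prod.fst).contains p.1))).map Prod.fst)).Sublist
        ((pvDictOf a).items.map Prod.fst) :=
      (List.filter_sublist).map _
    exact (nodup_keys_pvDictOf a).sublist hs
  have hnodY : ((((pvDictOf b).items.filter
        (fun p => !((a.map Prod.fst).contains p.1))).map Prod.fst)).Nodup := by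
    have hs : ((((pvDictOf b).items.filter
          (fun p => !((a.map Prod.fst).contains p.1))).map Prod.fst)).Sublist
        ((pvDictOf b).items.map Prod.fst) :=
      (List.filter_sublist).map _
    exact (nodup_keys_pvDictOf b).sublist hs
  have hnodXY : (((((pvDictOf a).items.filter (fun p => !((b.map Prod.fst).contains p.1)))
        ++ ((pvDictOf b).items.filter (fun p => !((a.map Prod.fst).contains p.1)))).map
          Prod.fst)).Nodup := by
    rw [List.map_append]
    refine List.Nodup.append hnodX hnodY ?_
    intro k hk1 hk2
    have h1 := (mem_keys_filter_not_b a b k hk1).2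
    rcases List.mem_map.mp hk2 with ⟨p, hp, rfl⟩
    rcases List.mem_filter.mp hp with ⟨hmem, _⟩
    have : p.1 ∈ (pvDictOf b).keys := List.mem_map.mpr ⟨p, hmem, rfl⟩
    exact h1 ((hmemkeys b p.1).mp this)
  -- assemble
  show _ = differenza_simmetrica_alt a b
  simp only [differenza_simmetrica_alt]
  rw [hBfilter, foldl_insert_nodup _ hnodXY, hAsplit]
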